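-- pv_equiv track=rewrite | github.com/tamarakatic/seq2seq | seq2seq/data_utils.py | form_ques_answ
-- ===== SOURCE A (Python) =====
-- def form_ques_answ(clean_questions, clean_answers):
--     short_questions = []
--     short_answers = []
--     i = 0
--     for question in clean_questions:
--         if 2 <= len(question.split()) <= 25:
--             short_questions.append(question)
--             short_answers.append(clean_answers[i])
--         i += 1
--
--     clean_questions = []
--     clean_answers = []
--     i = 0
--     for answer in short_answers:
--         if 2 <= len(answer.split()) <= 25:
--             clean_answers.append(answer)
--             clean_questions.append(short_questions[i])
--         i += 1
--
--     word2count = {}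
--     for question in clean_questions:
--         for word in question.split():
--             if word not in word2count:
--                 word2count[word] = 1
--             else:
--                 word2count[word] += 1
--
--     for answer in clean_answers:
--         for word in answer.split():
--             if word not in word2count:
--                 word2count[word] = 1
--             else:
--                 word2count[word] += 1
--
--     threshold = 15
--     questions_words_to_int = {}
--     word_number = 0
--     for word, count in word2count.items():
--         if count >= threshold:
--             questions_words_to_int[word] = word_number
--             word_number += 1
--
--     answers_words_to_int = {}
--     word_number = 0
--     for word, count in word2count.items():
--         if count >= threshold:
--             answers_words_to_int[word] = word_number
--             word_number += 1
--
--     tokens = ['<PAD>', '<EOS>', '<OUT>', '<SOS>']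
--     for token in tokens:
--         questions_words_to_int[token] = len(questions_words_to_int) + 1
--
--     for token in tokens:
--         answers_words_to_int[token] = len(answers_words_to_int) + 1
--
--     answers_ints_to_word = {w_i: w for w, w_i in answers_words_to_int.items()}
--
--     for i in range(len(clean_answers)):
--         clean_answers[i] += ' <EOS>'
--
--     questions_into_int = []
--     for question in clean_questions:
--         ints = []
--         for word in question.split():
--             if word not in questions_words_to_int:
--                 ints.append(questions_words_to_int['<OUT>'])
--             else:
--                 ints.append(questions_words_to_int[word])
--         questions_into_int.append(ints)
--
--     answers_into_int = []
--     for answer in clean_answers: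
--         ints = []
--         for word in answer.split():
--             if word not in answers_words_to_int:
--                 ints.append(answers_words_to_int['<OUT>'])
--             else:
--                 ints.append(answers_words_to_int[word])
--         answers_into_int.append(ints)
--
--     sorted_clean_questions = []
--     sorted_clean_answers = []
--     for length in range(1, 25 + 1):
--         for i in enumerate(questions_into_int):
--             if len(i[1]) == length:
--                 sorted_clean_questions.append(questions_into_int[i[0]])
--                 sorted_clean_answers.append(answers_into_int[i[0]])
--
--     return (answers_words_to_int,
--             answers_ints_to_word,
--             questions_words_to_int,
--             sorted_clean_questions,
--             sorted_clean_answers)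
-- ===== SOURCE B (Python) =====
-- def form_ques_answ(clean_questions, clean_answers):
--     def ok(s):
--         return 2 <= len(s.split()) <= 25
--
--     pairs = [(q, a) for q, a in zip(clean_questions, clean_answers)
--              if ok(q) and ok(a)]
--
--     word2count = {}
--     all_words = [w for q, _ in pairs for w in q.split()] + \
--                 [w for _, a in pairs for w in a.split()]
--     for w in all_words:
--         word2count[w] = word2count.get(w, 0) + 1
--
--     vocab = [w for w, c in word2count.items() if c >= 15]
--     questions_words_to_int = {w: i for i, w in enumerate(vocab)}
--     for token in ['<PAD>', '<EOS>', '<OUT>', '<SOS>']: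
--         questions_words_to_int[token] = len(questions_words_to_int) + 1
--     answers_words_to_int = dict(questions_words_to_int)
--     answers_ints_to_word = {w_i: w for w, w_i in answers_words_to_int.items()}
--
--     out_q = questions_words_to_int['<OUT>']
--     out_a = answers_words_to_int['<OUT>']
--     encoded = [([questions_words_to_int.get(w, out_q) for w in q.split()],
--                 [answers_words_to_int.get(w, out_a) for w in (a + ' <EOS>').split()])
--                for q, a in pairs]
--
--     buckets = {}
--     for pair in encoded:
--         buckets.setdefault(len(pair[0]), []).append(pair)
--
--     sorted_clean_questions = []
--     sorted_clean_answers = []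
--     for length in range(1, 26):
--         for q_ints, a_ints in buckets.get(length, []):
--             sorted_clean_questions.append(q_ints)
--             sorted_clean_answers.append(a_ints)
--
--     return (answers_words_to_int,
--             answers_ints_to_word,
--             questions_words_to_int,
--             sorted_clean_questions,
--             sorted_clean_answers)
-- ===== Notes on version B (the rewrite author's own statement) =====
-- stated objective: simpler
-- what changed: One filtered pass over zip(clean_questions, clean_answers) replaces A's two sequential index-driven filter loops, a single enumerate over the filtered frequent-word list replaces A's duplicated word-numbering loops (the answers dict becomes a copy), and a single bucketing pass (dict length -> pairs, concatenated for lengths 1..25) replaces A's 25-fold rescan of all encoded pairs.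
import Mathlib
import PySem

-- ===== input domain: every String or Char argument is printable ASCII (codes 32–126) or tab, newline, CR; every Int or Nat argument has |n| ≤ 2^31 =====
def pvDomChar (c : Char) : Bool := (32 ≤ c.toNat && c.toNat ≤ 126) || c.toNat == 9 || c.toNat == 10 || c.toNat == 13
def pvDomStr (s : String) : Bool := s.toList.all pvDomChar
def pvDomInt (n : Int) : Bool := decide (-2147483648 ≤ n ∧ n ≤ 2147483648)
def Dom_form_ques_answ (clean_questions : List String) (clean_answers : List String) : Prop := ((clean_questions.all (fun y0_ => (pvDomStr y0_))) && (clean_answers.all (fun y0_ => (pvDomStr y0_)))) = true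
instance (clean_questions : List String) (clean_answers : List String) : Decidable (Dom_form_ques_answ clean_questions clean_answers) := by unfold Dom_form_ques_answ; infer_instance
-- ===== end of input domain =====

-- B replaces A's two sequential index-driven length filters by one filtered zip, A's duplicated
-- vocabulary-numbering loops by an enumerate over the filtered word list, and A's 25-pass rescan
-- of all encoded pairs by a single bucketing pass; objective: simpler (same asymptotic cost).
-- The return value only is compared (A mutates no caller-visible argument).

-- ===== PORT A =====
def form_ques_answ (clean_questions : List String) (clean_answers : List String) : (List (String × Int)) × (List (Int × String)) × (List (String × Int)) × List (List Int) × List (List Int) :=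
  -- first filter loop (i counts; clean_answers[i] can raise: pyGetD's default "" is unreachable inside Pre_)
  let st1 := clean_questions.foldl
    (fun (st : (List String × List String) × Int) question =>
      if 2 ≤ (PySem.Str.split₀ question).length ∧ (PySem.Str.split₀ question).length ≤ 25 then
        ((st.1.1 ++ [question], st.1.2 ++ [PySem.List.pyGetD clean_answers st.2 ""]), st.2 + 1)
      else (st.1, st.2 + 1)) (([], []), 0)
  let short_questions := st1.1.1
  let short_answers := st1.1.2
  -- second filter loop (short_questions[i] is always in range here)
  let st2 := short_answers.foldl
    (fun (st : (List String × List String) × Int) answer =>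
      if 2 ≤ (PySem.Str.split₀ answer).length ∧ (PySem.Str.split₀ answer).length ≤ 25 then
        ((st.1.1 ++ [answer], st.1.2 ++ [PySem.List.pyGetD short_questions st.2 ""]), st.2 + 1)
      else (st.1, st.2 + 1)) (([], []), 0)
  let clean_answers2 := st2.1.1
  let clean_questions2 := st2.1.2
  -- word2count ('word2count[word] += 1': the key is present in that branch, so getD is exact)
  let w2c1 := clean_questions2.foldl (fun d question =>
      (PySem.Str.split₀ question).foldl (fun d word =>
        if !(PySem.Dict.contains d word) then PySem.Dict.insert d word 1
        else PySem.Dict.insert d word (PySem.Dict.getD d word 0 + 1)) d) PySem.Dict.empty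
  let word2count := clean_answers2.foldl (fun d answer =>
      (PySem.Str.split₀ answer).foldl (fun d word =>
        if !(PySem.Dict.contains d word) then PySem.Dict.insert d word 1
        else PySem.Dict.insert d word (PySem.Dict.getD d word 0 + 1)) d) w2c1
  let threshold : Int := 15
  let qst := (PySem.Dict.items word2count).foldl
      (fun (st : PySem.Dict String Int × Int) wc =>
        if wc.2 ≥ threshold then (PySem.Dict.insert st.1 wc.1 st.2, st.2 + 1) else st)
      (PySem.Dict.empty, 0)
  let ast := (PySem.Dict.items word2count).foldl
      (fun (st : PySem.Dict String Int × Int) wc =>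
        if wc.2 ≥ threshold then (PySem.Dict.insert st.1 wc.1 st.2, st.2 + 1) else st)
      (PySem.Dict.empty, 0)
  let tokens : List String := ["<PAD>", "<EOS>", "<OUT>", "<SOS>"]
  let questions_words_to_int := tokens.foldl
      (fun d token => PySem.Dict.insert d token ((PySem.Dict.size d : Int) + 1)) qst.1
  let answers_words_to_int := tokens.foldl
      (fun d token => PySem.Dict.insert d token ((PySem.Dict.size d : Int) + 1)) ast.1
  let answers_ints_to_word := (PySem.Dict.items answers_words_to_int).foldl
      (fun d p => PySem.Dict.insert d p.2 p.1) PySem.Dict.empty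
  -- 'for i in range(len(clean_answers)): clean_answers[i] += " <EOS>"' rewrites each element in order
  let clean_answers3 := clean_answers2.map (fun a => a ++ " <EOS>")
  -- encoding ('d[word]' / "d['<OUT>']": both keys present in the branch taken, so getD is exact)
  let questions_into_int := clean_questions2.foldl (fun acc question =>
      acc ++ [(PySem.Str.split₀ question).foldl (fun ints word =>
        if !(PySem.Dict.contains questions_words_to_int word) then
          ints ++ [PySem.Dict.getD questions_words_to_int "<OUT>" 0]
        else ints ++ [PySem.Dict.getD questions_words_to_int word 0]) []]) []
  let answers_into_int := clean_answers3.foldl (fun acc answer =>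
      acc ++ [(PySem.Str.split₀ answer).foldl (fun ints word =>
        if !(PySem.Dict.contains answers_words_to_int word) then
          ints ++ [PySem.Dict.getD answers_words_to_int "<OUT>" 0]
        else ints ++ [PySem.Dict.getD answers_words_to_int word 0]) []]) []
  -- bucket rescan: for length in range(1, 26): for i in enumerate(questions_into_int): ...
  let stF := (PySem.List.pyRange 1 (25 + 1) 1).foldl
      (fun (st : List (List Int) × List (List Int)) length =>
        (PySem.List.enumerate questions_into_int 0).foldl (fun st2 i =>
          if (i.2.length : Int) = length then
            (st2.1 ++ [PySem.List.pyGetD questions_into_int i.1 []],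
             st2.2 ++ [PySem.List.pyGetD answers_into_int i.1 []])
          else st2) st) ([], [])
  (PySem.Dict.items answers_words_to_int, PySem.Dict.items answers_ints_to_word,
   PySem.Dict.items questions_words_to_int, stF.1, stF.2)

-- ===== PORT B =====
-- 2 <= len(s.split()) <= 25
def pvOkB (s : String) : Bool :=
  decide (2 ≤ (PySem.Str.split₀ s).length ∧ (PySem.Str.split₀ s).length ≤ 25)

def form_ques_answ_alt (clean_questions : List String) (clean_answers : List String) : (List (String × Int)) × (List (Int × String)) × (List (String × Int)) × List (List Int) × List (List Int) :=
  let pairs := (clean_questions.zip clean_answers).filter (fun p => pvOkB p.1 && pvOkB p.2)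
  let all_words := pairs.flatMap (fun p => PySem.Str.split₀ p.1)
                   ++ pairs.flatMap (fun p => PySem.Str.split₀ p.2)
  let word2count := all_words.foldl
      (fun (d : PySem.Dict String Int) w => PySem.Dict.insert d w (PySem.Dict.getD d w 0 + 1)) PySem.Dict.empty
  let vocab := ((PySem.Dict.items word2count).filter (fun wc => decide (wc.2 ≥ 15))).map Prod.fst
  let q0 := (PySem.List.enumerate vocab 0).foldl
      (fun d pr => PySem.Dict.insert d pr.2 pr.1) PySem.Dict.empty
  let questions_words_to_int := (["<PAD>", "<EOS>", "<OUT>", "<SOS>"] : List String).foldl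
      (fun d token => PySem.Dict.insert d token ((PySem.Dict.size d : Int) + 1)) q0
  -- answers_words_to_int = dict(questions_words_to_int): a copy with the same items
  let answers_words_to_int := questions_words_to_int
  let answers_ints_to_word := (PySem.Dict.items answers_words_to_int).foldl
      (fun d p => PySem.Dict.insert d p.2 p.1) PySem.Dict.empty
  let out_q := PySem.Dict.getD questions_words_to_int "<OUT>" 0
  let out_a := PySem.Dict.getD answers_words_to_int "<OUT>" 0
  let encoded := pairs.map (fun p =>
      ((PySem.Str.split₀ p.1).map (fun w => PySem.Dict.getD questions_words_to_int w out_q),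
       (PySem.Str.split₀ (p.2 ++ " <EOS>")).map (fun w => PySem.Dict.getD answers_words_to_int w out_a)))
  let buckets := encoded.foldl
      (fun d pr => PySem.Dict.modify d (pr.1.length : Int) [] (fun l => l ++ [pr])) PySem.Dict.empty
  let stF := (PySem.List.pyRange 1 26 1).foldl
      (fun (st : List (List Int) × List (List Int)) length =>
        (PySem.Dict.getD buckets length []).foldl
          (fun st2 pr => (st2.1 ++ [pr.1], st2.2 ++ [pr.2])) st) ([], [])
  (PySem.Dict.items answers_words_to_int, PySem.Dict.items answers_ints_to_word,
   PySem.Dict.items questions_words_to_int, stF.1, stF.2)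

-- ===== PRECONDITION & SPEC =====
-- Pre_ excludes exactly the inputs where A raises IndexError: a question with 2..25 words at an
-- index with no matching answer (clean_answers shorter than clean_questions there).
def Pre_form_ques_answ (clean_questions : List String) (clean_answers : List String) : Prop :=
  ∀ i : Nat, i < clean_questions.length →
    (2 ≤ (PySem.Str.split₀ clean_questions[i]!).length ∧ (PySem.Str.split₀ clean_questions[i]!).length ≤ 25) →
    i < clean_answers.length
instance (clean_questions : List String) (clean_answers : List String) : Decidable (Pre_form_ques_answ clean_questions clean_answers) := by unfold Pre_form_ques_answ; infer_instance
def pvWitness_form_ques_answ : List String × List String :=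
  (["hello there", "a b c", "x"], ["hi you", "ok then fine", "y z"])
def Spec_form_ques_answ (clean_questions : List String) (clean_answers : List String) (out : (List (String × Int)) × (List (Int × String)) × (List (String × Int)) × List (List Int) × List (List Int)) : Prop := out = form_ques_answ_alt clean_questions clean_answers
instance (clean_questions : List String) (clean_answers : List String) (out : (List (String × Int)) × (List (Int × String)) × (List (String × Int)) × List (List Int) × List (List Int)) : Decidable (Spec_form_ques_answ clean_questions clean_answers out) := by unfold Spec_form_ques_answ; infer_instance

-- ===== CLAIM (what is proved, stated in full; the proofs are below) =====
def Claim_equal_form_ques_answ : Prop := ∀ (clean_questions : List String) (clean_answers : List String), Dom_form_ques_answ clean_questions clean_answers → Pre_form_ques_answ clean_questions clean_answers → Spec_form_ques_answ clean_questions clean_answers (form_ques_answ clean_questions clean_answers)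

-- ===== LEMMAS AND PROOFS =====

-- A's index-counting filter loop = the filtered zip, unzipped (the loop keeps element j of the
-- iterated list together with element j of the indexed list).
theorem pv_filter_fold (C : String → Prop) [DecidablePred C] (Alist : List String) :
    ∀ (q : List String) (s : Nat)
      (_h : ∀ j : Nat, (hj : j < q.length) → C q[j] → s + j < Alist.length)
      (acc : List String × List String),
      (q.foldl (fun (st : (List String × List String) × Int) x =>
          if C x then ((st.1.1 ++ [x], st.1.2 ++ [PySem.List.pyGetD Alist st.2 ""]), st.2 + 1)
          else (st.1, st.2 + 1)) (acc, (s : Int)))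
        = ((acc.1 ++ ((q.zip (Alist.drop s)).filter (fun pr => decide (C pr.1))).map Prod.fst,
            acc.2 ++ ((q.zip (Alist.drop s)).filter (fun pr => decide (C pr.1))).map Prod.snd),
           (s : Int) + q.length)
  | [], s, h, acc => by simp
  | x :: q, s, h, acc => by
    have hcast : ((s + 1 : Nat) : Int) = (s : Int) + 1 := by push_cast; ring
    by_cases hx : C x
    · have hlt : s < Alist.length := by simpa using h 0 (by simp) (by simpa using hx)
      have hdrop : Alist.drop s = Alist[s] :: Alist.drop (s + 1) := List.drop_eq_getElem_cons hlt
      have hget : PySem.List.pyGetD Alist (s : Int) "" = Alist[s] := by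
        rw [PySem.List.pyGetD_natCast, List.getD_eq_getElem _ _ hlt]
      have ih := pv_filter_fold C Alist q (s + 1)
        (fun j hj hc => by
          have := h (j + 1) (by simpa using hj) (by simpa using hc); omega)
        (acc.1 ++ [x], acc.2 ++ [Alist[s]])
      rw [hcast] at ih
      simp only [List.foldl_cons, if_pos hx, hget]
      rw [ih, hdrop]
      simp only [List.zip_cons_cons, List.filter_cons, hx, decide_true, List.length_cons]
      refine Prod.ext (Prod.ext ?_ ?_) ?_
      · simp
      · simp
      · simp only []
        push_cast
        ring
    · by_cases hlt : s < Alist.length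
      · have hdrop : Alist.drop s = Alist[s] :: Alist.drop (s + 1) := List.drop_eq_getElem_cons hlt
        have ih := pv_filter_fold C Alist q (s + 1)
          (fun j hj hc => by
            have := h (j + 1) (by simpa using hj) (by simpa using hc); omega) acc
        rw [hcast] at ih
        simp only [List.foldl_cons, if_neg hx]
        rw [ih, hdrop]
        simp only [List.zip_cons_cons, List.filter_cons, hx, decide_false, List.length_cons]
        refine Prod.ext rfl ?_
        simp only []
        push_cast
        ring
      · have hdrop : Alist.drop s = ([] : List String) := List.drop_eq_nil_of_le (by omega)
        have hdrop1 : Alist.drop (s + 1) = ([] : List String) := List.drop_eq_nil_of_le (by omega)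
        have ih := pv_filter_fold C Alist q (s + 1)
          (fun j hj hc => by
            have := h (j + 1) (by simpa using hj) (by simpa using hc); omega) acc
        rw [hcast] at ih
        simp only [List.foldl_cons, if_neg hx]
        rw [ih, hdrop, hdrop1]
        simp only [List.zip_nil_right, List.filter_nil, List.map_nil, List.append_nil,
          List.length_cons]
        refine Prod.ext rfl ?_
        simp only []
        push_cast
        ring

-- A's enumerate rescan for one length = the filtered zip of the two encoded lists.
theorem pv_bucket_fold (Q A : List (List Int)) (hlen : Q.length = A.length) (L : Int) :
    ∀ (q : List (List Int)) (s : Nat) (_hq : q = Q.drop s) (acc : List (List Int) × List (List Int)),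
      ((PySem.List.enumerate q (s : Int)).foldl
          (fun st pr => if (pr.2.length : Int) = L then
              (st.1 ++ [PySem.List.pyGetD Q pr.1 []], st.2 ++ [PySem.List.pyGetD A pr.1 []]) else st) acc)
        = (acc.1 ++ (((Q.drop s).zip (A.drop s)).filter (fun pr => decide ((pr.1.length : Int) = L))).map Prod.fst,
           acc.2 ++ (((Q.drop s).zip (A.drop s)).filter (fun pr => decide ((pr.1.length : Int) = L))).map Prod.snd)
  | [], s, hq, acc => by
      have hA : A.drop s = ([] : List (List Int)) := by
        have hQl : Q.length ≤ s := List.drop_eq_nil_iff.mp hq.symm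
        exact List.drop_eq_nil_iff.mpr (by omega)
      simp [← hq, hA]
  | x :: q, s, hq, acc => by
      have hltQ : s < Q.length := by
        by_contra hcon
        rw [List.drop_eq_nil_iff.mpr (by omega)] at hq
        exact (List.cons_ne_nil _ _) hq
      have hltA : s < A.length := by omega
      have hQd : Q.drop s = Q[s] :: Q.drop (s + 1) := List.drop_eq_getElem_cons hltQ
      have hx : x = Q[s] := by rw [hQd] at hq; exact (List.cons_eq_cons.mp hq).1
      have hq' : q = Q.drop (s + 1) := by rw [hQd] at hq; exact (List.cons_eq_cons.mp hq).2
      have hAd : A.drop s = A[s] :: A.drop (s + 1) := List.drop_eq_getElem_cons hltA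
      have hgQ : PySem.List.pyGetD Q (s : Int) [] = Q[s] := by
        rw [PySem.List.pyGetD_natCast, List.getD_eq_getElem _ _ hltQ]
      have hgA : PySem.List.pyGetD A (s : Int) [] = A[s] := by
        rw [PySem.List.pyGetD_natCast, List.getD_eq_getElem _ _ hltA]
      have hcast : ((s + 1 : Nat) : Int) = (s : Int) + 1 := by push_cast; ring
      by_cases hc : ((x.length : Int) = L)
      · have ih := pv_bucket_fold Q A hlen L q (s + 1) hq' (acc.1 ++ [Q[s]], acc.2 ++ [A[s]])
        rw [hcast] at ih
        simp only [PySem.List.enumerate_cons, List.foldl_cons, if_pos hc, hgQ, hgA]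
        rw [ih, hQd, hAd]
        simp only [List.zip_cons_cons, List.filter_cons, ← hx, hc, decide_true]
        simp
      · have ih := pv_bucket_fold Q A hlen L q (s + 1) hq' acc
        rw [hcast] at ih
        simp only [PySem.List.enumerate_cons, List.foldl_cons, if_neg hc]
        rw [ih, hQd, hAd]
        simp only [List.zip_cons_cons, List.filter_cons, ← hx, hc, decide_false]
        simp

-- A's word-number loop = a dict built from enumerate over the frequent words.
theorem pv_vocab_fold (t : Int) :
    ∀ (l : List (String × Int)) (d : PySem.Dict String Int) (n : Int),
      (l.foldl (fun (st : PySem.Dict String Int × Int) wc =>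
          if wc.2 ≥ t then (PySem.Dict.insert st.1 wc.1 st.2, st.2 + 1) else st) (d, n))
        = ((PySem.List.enumerate ((l.filter (fun wc => decide (wc.2 ≥ t))).map Prod.fst) n).foldl
             (fun dd pr => PySem.Dict.insert dd pr.2 pr.1) d,
           n + (l.countP (fun wc => decide (wc.2 ≥ t)) : Int))
  | [], d, n => by simp
  | wc :: l, d, n => by
    by_cases h : wc.2 ≥ t
    · simp only [List.foldl_cons, List.filter_cons, h, decide_true, List.countP_cons,
        pv_vocab_fold t l]
      refine Prod.ext rfl ?_
      simp
      ring
    · simp only [List.foldl_cons, List.filter_cons, h, decide_false, List.countP_cons,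
        pv_vocab_fold t l]
      simp

-- A's two-branch counting body is the unconditional counting body.
theorem pv_count_body (d : PySem.Dict String Int) (w : String) :
    (if !(PySem.Dict.contains d w) then PySem.Dict.insert d w 1
     else PySem.Dict.insert d w (PySem.Dict.getD d w 0 + 1))
      = PySem.Dict.insert d w (PySem.Dict.getD d w 0 + 1) := by
  by_cases h : PySem.Dict.contains d w
  · simp [h]
  · simp only [Bool.not_eq_true] at h
    simp [h, PySem.Dict.getD_of_not_contains d (0 : Int) h]

-- A's two-branch encoding body is getD with the '<OUT>' code as default.
theorem pv_enc_body (d : PySem.Dict String Int) (w : String) :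
    (if !(PySem.Dict.contains d w) then PySem.Dict.getD d "<OUT>" 0 else PySem.Dict.getD d w 0)
      = PySem.Dict.getD d w (PySem.Dict.getD d "<OUT>" 0) := by
  by_cases h : PySem.Dict.contains d w
  · have hs := PySem.Dict.contains_eq_isSome_get? d w
    rw [h] at hs
    obtain ⟨v, hv⟩ := Option.isSome_iff_exists.mp hs.symm
    simp [h, PySem.Dict.getD_eq_get?_getD, hv]
  · simp only [Bool.not_eq_true] at h
    simp [h, PySem.Dict.getD_of_not_contains d _ h]

-- a conditional append is an append of a conditional
theorem pv_ite_append {α : Type} (P : Prop) [Decidable P] (acc : List α) (a b : α) :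
    (if P then acc ++ [a] else acc ++ [b]) = acc ++ [if P then a else b] := by
  split <;> rfl

-- the two induction lemmas, specialised to start index 0
theorem pv_filter_fold0 (C : String → Prop) [DecidablePred C] (Alist : List String)
    (q : List String) (h : ∀ j : Nat, (hj : j < q.length) → C q[j] → j < Alist.length) :
    (q.foldl (fun (st : (List String × List String) × Int) x =>
        if C x then ((st.1.1 ++ [x], st.1.2 ++ [PySem.List.pyGetD Alist st.2 ""]), st.2 + 1)
        else (st.1, st.2 + 1)) (([], []), 0))
      = ((((q.zip Alist).filter (fun pr => decide (C pr.1))).map Prod.fst,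
          ((q.zip Alist).filter (fun pr => decide (C pr.1))).map Prod.snd),
         (q.length : Int)) := by
  have := pv_filter_fold C Alist q 0 (fun j hj hc => by simpa using h j hj hc) ([], [])
  simpa using this

theorem pv_bucket_fold0 (Q A : List (List Int)) (hlen : Q.length = A.length) (L : Int)
    (acc : List (List Int) × List (List Int)) :
    ((PySem.List.enumerate Q 0).foldl
        (fun st pr => if (pr.2.length : Int) = L then
            (st.1 ++ [PySem.List.pyGetD Q pr.1 []], st.2 ++ [PySem.List.pyGetD A pr.1 []]) else st) acc)
      = (acc.1 ++ ((Q.zip A).filter (fun pr => decide ((pr.1.length : Int) = L))).map Prod.fst,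
         acc.2 ++ ((Q.zip A).filter (fun pr => decide ((pr.1.length : Int) = L))).map Prod.snd) := by
  have := pv_bucket_fold Q A hlen L Q 0 (by simp) acc
  simpa using this

-- appending the two components of each pair = two appended projections
theorem pv_pair_append_fold {α β : Type} (l : List (α × β)) (st : List α × List β) :
    l.foldl (fun st2 pr => (st2.1 ++ [pr.1], st2.2 ++ [pr.2])) st
      = (st.1 ++ l.map Prod.fst, st.2 ++ l.map Prod.snd) := by
  induction l generalizing st with
  | nil => simp
  | cons x xs ih => simp [ih, List.append_assoc]

theorem pv_main (clean_questions clean_answers : List String)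
    (hpre : Pre_form_ques_answ clean_questions clean_answers) :
    form_ques_answ clean_questions clean_answers = form_ques_answ_alt clean_questions clean_answers := by
  simp only [form_ques_answ, form_ques_answ_alt, pvOkB]
  rw [pv_filter_fold0 (fun x => 2 ≤ (PySem.Str.split₀ x).length ∧ (PySem.Str.split₀ x).length ≤ 25)
        clean_answers clean_questions
        (fun j hj hc => hpre j hj (by rwa [getElem!_pos clean_questions j hj]))]
  dsimp only
  set Z1 := (clean_questions.zip clean_answers).filter
      (fun pr => decide (2 ≤ (PySem.Str.split₀ pr.1).length ∧ (PySem.Str.split₀ pr.1).length ≤ 25)) with hZ1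
  rw [pv_filter_fold0 (fun x => 2 ≤ (PySem.Str.split₀ x).length ∧ (PySem.Str.split₀ x).length ≤ 25)
        (Z1.map Prod.fst) (Z1.map Prod.snd)
        (fun j hj hc => by simpa using hj)]
  dsimp only
  rw [List.zip_map', List.filter_map]
  simp only [List.map_map, Function.comp_def]
  rw [hZ1, List.filter_filter]
  have hand : List.filter
      (fun a : String × String =>
        decide (2 ≤ (PySem.Str.split₀ a.2).length ∧ (PySem.Str.split₀ a.2).length ≤ 25) &&
        decide (2 ≤ (PySem.Str.split₀ a.1).length ∧ (PySem.Str.split₀ a.1).length ≤ 25))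
      (clean_questions.zip clean_answers)
      = List.filter
      (fun a : String × String =>
        decide (2 ≤ (PySem.Str.split₀ a.1).length ∧ (PySem.Str.split₀ a.1).length ≤ 25) &&
        decide (2 ≤ (PySem.Str.split₀ a.2).length ∧ (PySem.Str.split₀ a.2).length ≤ 25))
      (clean_questions.zip clean_answers) :=
    List.filter_congr (fun a _ => Bool.and_comm _ _)
  rw [hand]
  set Z := List.filter
      (fun a : String × String =>
        decide (2 ≤ (PySem.Str.split₀ a.1).length ∧ (PySem.Str.split₀ a.1).length ≤ 25) &&
        decide (2 ≤ (PySem.Str.split₀ a.2).length ∧ (PySem.Str.split₀ a.2).length ≤ 25))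
      (clean_questions.zip clean_answers) with hZ
  simp only [pv_count_body]
  rw [← List.foldl_flatMap, ← List.foldl_flatMap, ← List.foldl_append]
  simp only [List.flatMap_map]
  rw [pv_vocab_fold 15]
  dsimp only
  simp only [pv_ite_append, PySem.List.foldl_append_singleton_eq_map, List.nil_append, pv_enc_body,
    List.map_map, Function.comp_def]
  set qd := List.foldl (fun (d : PySem.Dict String Int) token => d.insert token ((d.size : Int) + 1))
      (List.foldl (fun (dd : PySem.Dict String Int) (pr : Int × String) => dd.insert pr.2 pr.1) PySem.Dict.empty
        (PySem.List.enumerate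
          (List.map Prod.fst
            (List.filter (fun wc => decide (wc.2 ≥ 15))
              (List.foldl (fun (d : PySem.Dict String Int) word => d.insert word (d.getD word 0 + 1))
                  PySem.Dict.empty
                  (List.flatMap (fun a => PySem.Str.split₀ a.1) Z ++
                    List.flatMap (fun a => PySem.Str.split₀ a.2) Z)).items))))
      ["<PAD>", "<EOS>", "<OUT>", "<SOS>"] with hqd
  set QI := List.map (fun (x : String × String) =>
      List.map (fun w => qd.getD w (qd.getD "<OUT>" 0)) (PySem.Str.split₀ x.1)) Z with hQI
  set AI := List.map (fun (x : String × String) =>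
      List.map (fun w => qd.getD w (qd.getD "<OUT>" 0)) (PySem.Str.split₀ (x.2 ++ " <EOS>"))) Z with hAI
  have hlen : QI.length = AI.length := by rw [hQI, hAI]; simp
  have hE : QI.zip AI = List.map (fun p =>
      (List.map (fun w => qd.getD w (qd.getD "<OUT>" 0)) (PySem.Str.split₀ p.1),
       List.map (fun w => qd.getD w (qd.getD "<OUT>" 0)) (PySem.Str.split₀ (p.2 ++ " <EOS>")))) Z := by
    rw [hQI, hAI, List.zip_map']
  set E := List.map (fun (p : String × String) =>
      (List.map (fun w => qd.getD w (qd.getD "<OUT>" 0)) (PySem.Str.split₀ p.1),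
       List.map (fun w => qd.getD w (qd.getD "<OUT>" 0)) (PySem.Str.split₀ (p.2 ++ " <EOS>")))) Z with hEdef
  have hbuck : ∀ L : Int,
      (List.foldl (fun d pr => PySem.Dict.modify d ((pr.1.length : Int)) [] (fun l => l ++ [pr]))
          PySem.Dict.empty E).getD L []
        = E.filter (fun pr => decide ((pr.1.length : Int) = L)) := by
    intro L
    have h1 : (List.foldl (fun d pr => PySem.Dict.modify d ((pr.1.length : Int)) [] (fun l => l ++ [pr]))
          PySem.Dict.empty E)
        = (List.foldl (fun d p => PySem.Dict.modify d p.1 [] (fun l => l ++ [p.2])) PySem.Dict.empty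
            (E.map (fun pr => ((pr.1.length : Int), pr)))) := by
      conv_rhs => rw [List.foldl_map]
    rw [h1, PySem.Dict.getD_foldl_modify_append]
    simp only [PySem.Dict.getD_empty, List.nil_append, List.filter_map, Function.comp_def]
    rw [List.map_map]
    have : ((fun (x : Int × ((List Int) × (List Int))) => x.2) ∘
        (fun pr : (List Int) × (List Int) => ((pr.1.length : Int), pr))) = id := rfl
    rw [this, List.map_id]
    exact List.filter_congr (fun a _ => Bool.beq_eq_decide_eq _ _)
  refine Prod.ext ?_ (Prod.ext ?_ (Prod.ext ?_ (Prod.ext ?_ ?_)))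
  · rfl
  · rfl
  · rfl
  · dsimp only
    simp only [pv_bucket_fold0 QI AI hlen, hE, hbuck, pv_pair_append_fold]
    rw [PySem.List.foldl_prod_mk (f := fun acc (L : Int) => acc ++ (E.filter
          (fun pr => decide ((pr.1.length : Int) = L))).map Prod.fst)
        (g := fun acc (L : Int) => acc ++ (E.filter
          (fun pr => decide ((pr.1.length : Int) = L))).map Prod.snd),
      PySem.List.foldl_prod_mk (f := fun acc (L : Int) => acc ++ (E.filter
          (fun pr => decide ((pr.1.length : Int) = L))).map Prod.fst)
        (g := fun acc (L : Int) => acc ++ (E.filter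
          (fun pr => decide ((pr.1.length : Int) = L))).map Prod.snd)]
    norm_num
  · dsimp only
    simp only [pv_bucket_fold0 QI AI hlen, hE, hbuck, pv_pair_append_fold]
    rw [PySem.List.foldl_prod_mk (f := fun acc (L : Int) => acc ++ (E.filter
          (fun pr => decide ((pr.1.length : Int) = L))).map Prod.fst)
        (g := fun acc (L : Int) => acc ++ (E.filter
          (fun pr => decide ((pr.1.length : Int) = L))).map Prod.snd),
      PySem.List.foldl_prod_mk (f := fun acc (L : Int) => acc ++ (E.filter
          (fun pr => decide ((pr.1.length : Int) = L))).map Prod.fst)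
        (g := fun acc (L : Int) => acc ++ (E.filter
          (fun pr => decide ((pr.1.length : Int) = L))).map Prod.snd)]
    norm_num

-- ===== VERDICT (by name: the statement is the Claim_ definition above) =====
theorem form_ques_answ_spec : Claim_equal_form_ques_answ := by
  intro qs as _hdom hpre
  exact pv_main qs as hpre
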